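-- pv_equiv track=rewrite | github.com/binaryninja/glitcher | glitcher/utils/validation_utils.py | is_valid_email_token
-- ===== SOURCE A (Python) =====
-- import string
--
-- def is_valid_email_token(token: str) -> bool:
--     """
--     Check if a token creates a valid email address when inserted into jeremy{token}@richards.ai
--
--     Args:
--         token: The token to validate
--
--     Returns:
--         True if the resulting email would be valid
--     """
--     # Check if token contains only valid email characters (letters, numbers, dots, hyphens, underscores)
--     # No spaces, special characters, or other invalid email characters
--     valid_chars = set(string.ascii_letters + string.digits + '.-_')
--
--     # Check if all characters in token are valid for email (don't strip - spaces anywhere are invalid)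
--     if not all(c in valid_chars for c in token):
--         return False
--
--     # Check for other invalid patterns
--     if (
--         token == '' or                    # Empty token
--         token.startswith('.') or          # Starts with dot
--         token.endswith('.') or            # Ends with dot
--         '..' in token or                  # Consecutive dots
--         token.startswith('-') or          # Starts with hyphen
--         token.endswith('-')               # Ends with hyphen
--     ):
--         return False
--
--     return True
-- ===== SOURCE B (Python) =====
-- def _is_allowed(c):
--     return (c.isascii() and c.isalnum()) or c in '._-'
--
-- def is_valid_email_token(token: str) -> bool:
--     # single left-to-right scan tracking the previous character (a small automaton)
--     prev = None
--     for c in token: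
--         if not _is_allowed(c):
--             return False
--         if c == '-' and prev is None:
--             return False
--         if c == '.' and (prev is None or prev == '.'):
--             return False
--         prev = c
--     return prev is not None and prev != '.' and prev != '-'
-- ===== Notes on version B (the rewrite author's own statement) =====
-- stated objective: alternative
-- what changed: A's multi-pass check (an all(...) membership scan over a character set followed by five separate startswith/endswith/substring guards) is replaced by a single left-to-right scan that tracks the previous character and rejects a disallowed character, a bad leading or doubled dot, a leading hyphen, or a trailing dot or hyphen as it goes.
import Mathlib
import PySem

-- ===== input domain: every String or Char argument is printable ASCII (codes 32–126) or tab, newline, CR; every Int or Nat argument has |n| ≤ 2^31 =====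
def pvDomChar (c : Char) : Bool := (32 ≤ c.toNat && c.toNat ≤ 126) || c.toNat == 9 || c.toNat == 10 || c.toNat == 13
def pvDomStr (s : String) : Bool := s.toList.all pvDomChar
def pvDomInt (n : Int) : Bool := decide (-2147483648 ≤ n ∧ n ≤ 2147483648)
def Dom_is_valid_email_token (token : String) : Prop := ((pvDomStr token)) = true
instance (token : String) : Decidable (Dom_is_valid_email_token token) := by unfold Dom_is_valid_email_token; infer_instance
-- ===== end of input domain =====

-- B replaces A's multi-pass check (an all(...) scan plus five startswith/endswith/substring guards)
-- by a single left-to-right scan tracking the previous character; objective: alternative (one pass).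

-- ===== PORT A =====
-- set(string.ascii_letters + string.digits + '.-_')
def pvValidSet : PySem.Set Char :=
  PySem.Set.ofList "abcdefghijklmnopqrstuvwxyzABCDEFGHIJKLMNOPQRSTUVWXYZ0123456789.-_".toList

def is_valid_email_token (token : String) : Bool :=
  let valid_chars := pvValidSet
  if !(token.toList.all (fun c => PySem.Set.contains valid_chars c)) then false
  else if (token == "" || PySem.Str.startswith token "." || PySem.Str.endswith token "."
        || PySem.Str.isIn ".." token || PySem.Str.startswith token "-"
        || PySem.Str.endswith token "-") then false
  else true

-- ===== PORT B =====
-- _is_allowed(c): (c.isascii() and c.isalnum()) or c in '._-'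
def okChar (c : Char) : Bool :=
  (decide (c.toNat ≤ 127) && PySem.Chars.isalnum c) || c == '.' || c == '_' || c == '-'

-- the for-loop of B: state = previous character (None before the first one)
def altLoop : List Char → Option Char → Bool
  | [], prev =>
    match prev with
    | none => false
    | some p => !(p == '.' || p == '-')
  | c :: rest, prev =>
    if !okChar c then false
    else if c == '-' && prev.isNone then false
    else if c == '.' && (prev.isNone || prev == some '.') then false
    else altLoop rest (some c)

def is_valid_email_token_alt (token : String) : Bool := altLoop token.toList none

-- ===== PRECONDITION & SPEC =====
def Spec_is_valid_email_token (token : String) (out : Bool) : Prop := out = is_valid_email_token_alt token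
instance (token : String) (out : Bool) : Decidable (Spec_is_valid_email_token token out) := by unfold Spec_is_valid_email_token; infer_instance

-- ===== CLAIM (what is proved, stated in full; the proofs are below) =====
def Claim_equal_is_valid_email_token : Prop := ∀ (token : String), Dom_is_valid_email_token token → Spec_is_valid_email_token token (is_valid_email_token token)

-- ===== LEMMAS AND PROOFS =====

-- the two per-character tests agree on all 7-bit characters (checked by evaluation)
set_option maxRecDepth 10000 in
lemma charEq128 : ∀ n : Fin 128,
    PySem.Set.contains pvValidSet (Char.ofNat n.val) = okChar (Char.ofNat n.val) := by decide

lemma charEq (c : Char) (h : pvDomChar c = true) :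
    PySem.Set.contains pvValidSet c = okChar c := by
  have hn : c.toNat < 128 := by
    simp [pvDomChar] at h
    omega
  simpa [Char.ofNat_toNat] using charEq128 ⟨c.toNat, hn⟩

lemma suffix_singleton_iff (x d : Char) (cs : List Char) (h : cs ≠ []) :
    ([x] <:+ cs ↔ cs.getLastD d = x) := by
  induction cs generalizing d with
  | nil => exact absurd rfl h
  | cons c rest ih =>
    cases rest with
    | nil => simp [List.suffix_cons_iff, eq_comm]
    | cons c' rest' =>
      rw [List.getLastD_cons]
      rw [← ih c (by simp)]
      constructor
      · intro hs
        rcases List.suffix_cons_iff.mp hs with h1 | h1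
        · simp at h1
        · exact h1
      · intro hs
        exact List.suffix_cons_iff.mpr (Or.inr hs)

lemma no_dd_singleton (p : Char) : ¬ (['.', '.'] <:+: [p]) := by
  intro h
  have := h.length_le
  simp at this

lemma altLoop_some (cs : List Char) (p : Char) :
    (altLoop cs (some p) = true ↔
      (∀ c ∈ cs, okChar c = true) ∧ ¬ (['.', '.'] <:+: (p :: cs)) ∧
        cs.getLastD p ≠ '.' ∧ cs.getLastD p ≠ '-') := by
  induction cs generalizing p with
  | nil =>
    simp [altLoop, no_dd_singleton p]
  | cons c rest ih =>
    by_cases hok : okChar c = true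
    · by_cases hdd : c = '.' ∧ p = '.'
      · obtain ⟨h1, h2⟩ := hdd
        subst h1; subst h2
        have hinf : (['.', '.'] <:+: ('.' :: '.' :: rest)) :=
          List.IsPrefix.isInfix (by simp)
        simp [altLoop, hinf]
      · have hstep : altLoop (c :: rest) (some p) = altLoop rest (some c) := by
          simp only [altLoop, hok]
          simp only [Bool.not_true, Bool.false_eq_true, if_false]
          simp
          intro _
          by_cases hc : c = '.'
          · exact Or.inr (fun hp => hdd ⟨hc, hp⟩)
          · exact Or.inl hc
        have hinfix : (['.', '.'] <:+: (p :: c :: rest)) ↔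
            ((p = '.' ∧ c = '.') ∨ (['.', '.'] <:+: (c :: rest))) := by
          rw [List.infix_cons_iff]
          constructor
          · rintro (hp | hp)
            · rcases List.cons_prefix_cons.mp hp with ⟨e1, hp2⟩
              rcases List.cons_prefix_cons.mp hp2 with ⟨e3, _⟩
              exact Or.inl ⟨e1.symm, e3.symm⟩
            · exact Or.inr hp
          · rintro (⟨e1, e3⟩ | hp)
            · subst e1; subst e3
              exact Or.inl (by simp)
            · exact Or.inr hp
        rw [hstep, ih c, List.getLastD_cons, hinfix]
        constructor
        · rintro ⟨ha, hb, hc1, hc2⟩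
          refine ⟨?_, ?_, hc1, hc2⟩
          · intro x hx
            rcases List.mem_cons.mp hx with h | h
            · subst h; exact hok
            · exact ha x h
          · rintro (⟨hp, hc⟩ | h2)
            · exact hdd ⟨hc, hp⟩
            · exact hb h2
        · rintro ⟨ha, hb, hc1, hc2⟩
          refine ⟨fun x hx => ha x (List.mem_cons.mpr (Or.inr hx)), ?_, hc1, hc2⟩
          intro h2; exact hb (Or.inr h2)
    · simp [altLoop, hok]

lemma alt_cons (c : Char) (rest : List Char) :
    (altLoop (c :: rest) none = true ↔
      okChar c = true ∧ c ≠ '-' ∧ c ≠ '.' ∧ altLoop rest (some c) = true) := by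
  by_cases hok : okChar c = true
  · by_cases hm : c = '-'
    · subst hm; simp [altLoop, hok]
    · by_cases hd : c = '.'
      · subst hd; simp [altLoop]
      · simp only [altLoop, hok]
        simp [hm, hd]
  · simp [altLoop, hok]

-- ===== VERDICT (by name: the statement is the Claim_ definition above) =====
theorem is_valid_email_token_spec : Claim_equal_is_valid_email_token := by
  intro token hDom
  unfold Spec_is_valid_email_token
  rw [Bool.eq_iff_iff]
  cases hcs : token.toList with
  | nil =>
    have ht : token = "" := String.toList_eq_nil_iff.mp hcs
    subst ht
    decide
  | cons c rest =>
    have hne : token ≠ "" := by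
      intro h; rw [h] at hcs; simp at hcs
    have hdomchars : ∀ x ∈ token.toList, pvDomChar x = true := by
      have := hDom
      unfold Dom_is_valid_email_token pvDomStr at this
      exact List.all_eq_true.mp this
    -- A side
    have hA : (is_valid_email_token token = true ↔
        ((∀ x ∈ token.toList, okChar x = true) ∧
          ¬ (token = "" ∨ (".".toList <+: token.toList) ∨ (".".toList <:+ token.toList)
             ∨ ("..".toList <:+: token.toList) ∨ ("-".toList <+: token.toList)
             ∨ ("-".toList <:+ token.toList)))) := by
      have hcontains : (token.toList.all fun x => PySem.Set.contains pvValidSet x)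
          = token.toList.all okChar := by
        rw [Bool.eq_iff_iff, List.all_eq_true, List.all_eq_true]
        constructor
        · intro h x hx; rw [← charEq x (hdomchars x hx)]; exact h x hx
        · intro h x hx; rw [charEq x (hdomchars x hx)]; exact h x hx
      simp only [is_valid_email_token]
      rw [hcontains]
      by_cases hall : token.toList.all okChar = true
      · simp only [hall, Bool.not_true, Bool.false_eq_true, if_false]
        rw [List.all_eq_true] at hall
        by_cases hbig : (token == "" || PySem.Str.startswith token "." || PySem.Str.endswith token "."
            || PySem.Str.isIn ".." token || PySem.Str.startswith token "-"
            || PySem.Str.endswith token "-") = true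
        · simp only [hbig, if_true]
          rw [Bool.or_eq_true, Bool.or_eq_true, Bool.or_eq_true, Bool.or_eq_true,
            Bool.or_eq_true] at hbig
          constructor
          · intro h; exact absurd h (by simp)
          · intro h
            exfalso
            apply h.2
            rcases hbig with ((((h1 | h1) | h1) | h1) | h1) | h1
            · exact Or.inl (by simpa using h1)
            · exact Or.inr (Or.inl ((PySem.Chars.startswith_iff _ _).mp (by simpa using h1)))
            · exact Or.inr (Or.inr (Or.inl ((PySem.Chars.endswith_iff _ _).mp (by simpa using h1))))
            · exact Or.inr (Or.inr (Or.inr (Or.inl ((PySem.Chars.isIn_iff_infix _ _).mp (by simpa using h1)))))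
            · exact Or.inr (Or.inr (Or.inr (Or.inr (Or.inl ((PySem.Chars.startswith_iff _ _).mp (by simpa using h1))))))
            · exact Or.inr (Or.inr (Or.inr (Or.inr (Or.inr ((PySem.Chars.endswith_iff _ _).mp (by simpa using h1))))))
        · simp only [hbig]  -- condition false: result true
          rw [Bool.or_eq_true, Bool.or_eq_true, Bool.or_eq_true, Bool.or_eq_true,
            Bool.or_eq_true] at hbig
          push Not at hbig
          constructor
          · intro _
            refine ⟨hall, ?_⟩
            rintro (h | h | h | h | h | h)
            · exact absurd (by simpa using h) hbig.1.1.1.1.1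
            · exact absurd (by simpa using (PySem.Chars.startswith_iff (token.toList) (".".toList)).mpr h) (by simpa using hbig.1.1.1.1.2)
            · exact absurd (by simpa using (PySem.Chars.endswith_iff (token.toList) (".".toList)).mpr h) (by simpa using hbig.1.1.1.2)
            · exact absurd ((by simpa using (PySem.Chars.isIn_iff_infix ("..".toList) (token.toList)).mpr h : PySem.Str.isIn ".." token = true)) (by simpa using hbig.1.1.2)
            · exact absurd (by simpa using (PySem.Chars.startswith_iff (token.toList) ("-".toList)).mpr h) (by simpa using hbig.1.2)
            · exact absurd (by simpa using (PySem.Chars.endswith_iff (token.toList) ("-".toList)).mpr h) (by simpa using hbig.2)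
          · intro _; rfl
      · simp only [hall]
        simp only [Bool.not_false, if_true]
        rw [List.all_eq_true] at hall
        constructor
        · intro h; exact absurd h (by simp)
        · intro h; exact absurd h.1 hall
    rw [hA]
    -- B side
    have hB : (is_valid_email_token_alt token = true ↔
        okChar c = true ∧ c ≠ '-' ∧ c ≠ '.' ∧
          ((∀ x ∈ rest, okChar x = true) ∧ ¬ (['.', '.'] <:+: (c :: rest)) ∧
            rest.getLastD c ≠ '.' ∧ rest.getLastD c ≠ '-')) := by
      unfold is_valid_email_token_alt
      rw [hcs, alt_cons, altLoop_some]
    rw [hB, hcs]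
    have hlast : ∀ y : Char, (([y] <:+ (c :: rest)) ↔ rest.getLastD c = y) := by
      intro y
      rw [suffix_singleton_iff y c (c :: rest) (by simp), List.getLastD_cons]
    constructor
    · rintro ⟨hall, hnot⟩
      push Not at hnot
      refine ⟨hall c (by simp), ?_, ?_, fun x hx => hall x (by simp [hx]), ?_, ?_, ?_⟩
      · intro h; subst h
        exact hnot.2.2.2.2.1 (by simp)
      · intro h; subst h
        exact hnot.2.1 (by simp)
      · intro h
        exact hnot.2.2.2.1 (by simpa using h)
      · intro h
        exact hnot.2.2.1 ((hlast '.').mpr h)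
      · intro h
        exact hnot.2.2.2.2.2 ((hlast '-').mpr h)
    · rintro ⟨hokc, hm, hd, hall, hdd, hl1, hl2⟩
      refine ⟨?_, ?_⟩
      · intro x hx
        rcases List.mem_cons.mp hx with h | h
        · subst h; exact hokc
        · exact hall x h
      · rintro (h | h | h | h | h | h)
        · exact hne h
        · have h' : ['.'] <+: c :: rest := by simpa using h
          rcases List.cons_prefix_cons.mp h' with ⟨e, _⟩
          exact hd e.symm
        · have h' : ['.'] <:+ c :: rest := by simpa using h
          exact hl1 ((hlast '.').mp h')
        · exact hdd (by simpa using h)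
        · have h' : ['-'] <+: c :: rest := by simpa using h
          rcases List.cons_prefix_cons.mp h' with ⟨e, _⟩
          exact hm e.symm
        · have h' : ['-'] <:+ c :: rest := by simpa using h
          exact hl2 ((hlast '-').mp h')
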